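-- pv_equiv track=rewrite | github.com/MatteoVicenzino/ProgrammingLab | Esame/esame.py | day_arrangement
-- ===== SOURCE A (Python) =====
-- def day_arrangement(time_series):
--
--     lista_giornate = [] #creo lista di liste
--     daily_values = [] #contiene tutte le temperature di una singola giornate
--     for i in range(len(time_series)):
--         if i == 0: #caso primo valore: lo aggiungo a daily_values
--             daily_values = [time_series[i][1]]
--         elif time_series[i][0] == time_series[i-1][0]:
--             #se il giorno è uguale al precedente
--             #aggiungo il valore ad una stessa daily_values
--             daily_values.append(time_series[i][1])
--         else:
--             #se invece è diverso
--             #sovrascrivo daily_values dopo averla aggiunta alla lista delle giornate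
--             lista_giornate.append(daily_values)
--             daily_values = [time_series[i][1]]
--         if i == len(time_series)-1: #caso ultimo valore:
--             #aggiungo l'ultima giornata alla lista delle giornate
--             lista_giornate.append(daily_values)
--
--     return lista_giornate
-- ===== SOURCE B (Python) =====
-- def day_arrangement(time_series):
--     # Run-based grouping: scan each maximal run of equal days with an inner loop,
--     # instead of A's single loop with first/last sentinels and prev-element comparison.
--     result = []
--     i = 0
--     n = len(time_series)
--     while i < n:
--         day = time_series[i][0]
--         j = i
--         values = []
--         while j < n and time_series[j][0] == day:
--             values.append(time_series[j][1])
--             j += 1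
--         result.append(values)
--         i = j
--     return result
-- ===== Notes on version B (the rewrite author's own statement) =====
-- stated objective: simpler
-- what changed: Replaced A's single index loop with i==0 / i==len-1 sentinel cases and previous-element comparison by a two-level run scan: an outer loop takes the day of the current head and an inner loop collects the whole maximal run of that day, so no boundary special cases remain.
import Mathlib
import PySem

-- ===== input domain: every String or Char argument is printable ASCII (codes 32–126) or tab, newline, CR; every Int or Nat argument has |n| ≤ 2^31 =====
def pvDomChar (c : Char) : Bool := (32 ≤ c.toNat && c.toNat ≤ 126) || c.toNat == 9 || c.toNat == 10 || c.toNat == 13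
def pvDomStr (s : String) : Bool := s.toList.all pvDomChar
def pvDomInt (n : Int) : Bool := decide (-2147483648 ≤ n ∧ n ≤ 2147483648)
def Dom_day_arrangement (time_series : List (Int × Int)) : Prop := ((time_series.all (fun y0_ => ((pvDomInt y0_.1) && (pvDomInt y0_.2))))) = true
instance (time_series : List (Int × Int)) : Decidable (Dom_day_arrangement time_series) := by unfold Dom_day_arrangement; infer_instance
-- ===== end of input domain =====

-- B groups the series by an outer run-scan (inner loop collects each maximal run of one day),
-- replacing A's single index loop with first/last sentinels; objective: simpler (same O(n) cost).


-- ===== PORT A =====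
-- A's for-loop over range(len(time_series)) as a structural recursion on the index i,
-- carrying the same state (lista_giornate, daily_values); time_series[i] is in range
-- whenever read (i < len), so getD's default is never used.
def dayArrLoopA (ts : List (Int × Int)) (i : Nat) (lista : List (List Int)) (daily : List Int) : List (List Int) :=
  if _h : i < ts.length then
    let cur := ts.getD i (0, 0)
    let prev := ts.getD (i - 1) (0, 0)
    let (lista', daily') :=
      if i = 0 then (lista, [cur.2])
      else if cur.1 = prev.1 then (lista, daily ++ [cur.2])
      else (lista ++ [daily], [cur.2])
    let lista'' := if i = ts.length - 1 then lista' ++ [daily'] else lista'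
    dayArrLoopA ts (i + 1) lista'' daily'
  else lista
termination_by ts.length - i

def day_arrangement (time_series : List (Int × Int)) : List (List Int) :=
  dayArrLoopA time_series 0 [] []

-- ===== PORT B =====
-- B's inner while loop: collect the run of entries whose day equals `day`, return (values, rest).
def takeRunB (day : Int) : List (Int × Int) → List Int × List (Int × Int)
  | [] => ([], [])
  | (d, v) :: rest =>
      if d = day then
        let (r, rs) := takeRunB day rest
        (v :: r, rs)
      else ([], (d, v) :: rest)

theorem takeRunB_len (day : Int) (l : List (Int × Int)) : (takeRunB day l).2.length ≤ l.length := by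
  induction l with
  | nil => simp [takeRunB]
  | cons hd tl ih =>
      obtain ⟨d, v⟩ := hd
      simp only [takeRunB]
      split
      · simpa using Nat.le_succ_of_le ih
      · simp

-- B's outer while loop as recursion on the remaining list.
def day_arrangement_alt : List (Int × Int) → List (List Int)
  | [] => []
  | (d, v) :: rest =>
      let p := takeRunB d rest
      (v :: p.1) :: day_arrangement_alt p.2
termination_by l => l.length
decreasing_by
  simpa using Nat.lt_succ_of_le (takeRunB_len d rest)

-- ===== PRECONDITION & SPEC =====
def Spec_day_arrangement (time_series : List (Int × Int)) (out : List (List Int)) : Prop := out = day_arrangement_alt time_series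
instance (time_series : List (Int × Int)) (out : List (List Int)) : Decidable (Spec_day_arrangement time_series out) := by unfold Spec_day_arrangement; infer_instance

-- ===== CLAIM (what is proved, stated in full; the proofs are below) =====
def Claim_equal_day_arrangement : Prop := ∀ (time_series : List (Int × Int)), Dom_day_arrangement time_series → Spec_day_arrangement time_series (day_arrangement time_series)

-- ===== LEMMAS AND PROOFS =====

-- Specification of A's loop from index 1 on, as a structural recursion:
-- g d daily l finishes the current run `daily` of day `d` against the rest `l`.
def gRuns (d : Int) (daily : List Int) : List (Int × Int) → List (List Int)
  | [] => [daily]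
  | (d', v) :: rest =>
      if d' = d then gRuns d (daily ++ [v]) rest
      else daily :: gRuns d' [v] rest

theorem alt_nil : day_arrangement_alt [] = [] := by
  rw [day_arrangement_alt]

theorem alt_cons (d v : Int) (rest : List (Int × Int)) :
    day_arrangement_alt ((d, v) :: rest) =
      (v :: (takeRunB d rest).1) :: day_arrangement_alt (takeRunB d rest).2 := by
  rw [day_arrangement_alt]

theorem loopA_stop (ts : List (Int × Int)) (i : Nat) (h : ¬ i < ts.length)
    (lista : List (List Int)) (daily : List Int) : dayArrLoopA ts i lista daily = lista := by
  rw [dayArrLoopA]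
  simp [h]

theorem gRuns_eq_alt (l : List (Int × Int)) : ∀ (d : Int) (daily : List Int),
    gRuns d daily l = (daily ++ (takeRunB d l).1) :: day_arrangement_alt (takeRunB d l).2 := by
  induction l with
  | nil => intro d daily; simp [gRuns, takeRunB, alt_nil]
  | cons hd tl ih =>
      intro d daily
      obtain ⟨d', v⟩ := hd
      by_cases h : d' = d
      · simp [gRuns, takeRunB, h, ih d (daily ++ [v])]
      · simp [gRuns, takeRunB, h, alt_cons, ih d' [v]]

set_option maxRecDepth 8000 in
theorem loopA_eq_gRuns (ts : List (Int × Int)) (i : Nat) (h1 : 1 ≤ i) (hlt : i < ts.length)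
    (lista : List (List Int)) (daily : List Int) :
    dayArrLoopA ts i lista daily = lista ++ gRuns (ts.getD (i - 1) (0, 0)).1 daily (ts.drop i) := by
  have hne : i ≠ 0 := by omega
  have hdropi : ts.drop i = ts[i]?.getD ((0 : Int), (0 : Int)) :: ts.drop (i + 1) := by
    rw [List.getElem?_eq_getElem hlt]
    exact List.drop_eq_getElem_cons hlt
  by_cases hlast : i = ts.length - 1
  · have hstop : ¬ (i + 1 < ts.length) := by omega
    have hdrop1 : ts.drop (i + 1) = [] := List.drop_eq_nil_of_le (by omega)
    rw [dayArrLoopA]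
    by_cases heq : (ts[i]'hlt).1 = (ts[i - 1]?.getD ((0 : Int), (0 : Int))).1
    · simp [hlt, hne, eq_true hlast, hstop, hdropi, hdrop1, heq, gRuns, loopA_stop,
        List.getD_eq_getElem?_getD]
    · simp [hlt, hne, eq_true hlast, hstop, hdropi, hdrop1, heq, gRuns, loopA_stop,
        List.getD_eq_getElem?_getD]
  · have hlt1 : i + 1 < ts.length := by omega
    have ihs := fun lista daily => loopA_eq_gRuns ts (i + 1) (by omega) hlt1 lista daily
    simp only [Nat.add_sub_cancel] at ihs
    rw [dayArrLoopA]
    simp only [ihs]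
    by_cases heq : (ts[i]'hlt).1 = (ts[i - 1]?.getD ((0 : Int), (0 : Int))).1
    all_goals
      simp only [hlt, hne, hlast, hdropi, gRuns, List.getD_eq_getElem?_getD,
        List.getElem?_eq_getElem hlt, Option.getD_some, dif_pos, if_true, if_false]
    · simp [heq]
    · simp [heq, List.append_assoc]
termination_by ts.length - i

theorem day_arrangement_eq (ts : List (Int × Int)) : day_arrangement ts = day_arrangement_alt ts := by
  cases ts with
  | nil => simp [day_arrangement, loopA_stop, alt_nil]
  | cons hd tl =>
    obtain ⟨d, v⟩ := hd
    cases tl with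
    | nil =>
        rw [day_arrangement, dayArrLoopA]
        simp [loopA_stop, alt_cons, takeRunB, alt_nil]
    | cons hd2 tl2 =>
        rw [day_arrangement, dayArrLoopA]
        have hlen : 0 < ((d, v) :: hd2 :: tl2).length := by simp
        have hlast : ¬ (0 = ((d, v) :: hd2 :: tl2).length - 1) := by simp
        simp only [hlen, dif_pos, if_true, hlast, if_neg, not_false_iff, List.getD_cons_zero]
        rw [loopA_eq_gRuns _ 1 (by omega) (by simp) [] [v]]
        simp only [List.nil_append, List.drop_one]
        rw [gRuns_eq_alt]
        simp [alt_cons]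

-- ===== VERDICT (by name: the statement is the Claim_ definition above) =====
theorem day_arrangement_spec : Claim_equal_day_arrangement := by
  intro ts _
  unfold Spec_day_arrangement
  exact day_arrangement_eq ts
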